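-- pv_equiv track=rewrite | github.com/Shilpa3107/General_codes | Cus.py | total_days_from_start
-- ===== SOURCE A (Python) =====
-- def total_days_from_start(y, m, d, days_in_year, days_in_month):
--     total_days = 0
--     rem = days_in_year % days_in_month
--     base_months = days_in_year // days_in_month
--     acc = 0
--
--     for year in range(1, y):
--         total_days += base_months * days_in_month
--         acc += rem
--         if acc >= days_in_month:
--             total_days += days_in_month
--             acc -= days_in_month
--
--     # For current year, add months and days
--     total_days += (m - 1) * days_in_month + (d - 1)
--     return total_days
-- ===== SOURCE B (Python) =====
-- def total_days_from_start(y, m, d, days_in_year, days_in_month):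
--     # Closed form: the loop adds base_months*days_in_month per elapsed year and
--     # one extra month whenever the accumulated remainder carries past a month;
--     # after k years the carries total days_in_month * (k*rem // days_in_month).
--     elapsed = max(y - 1, 0)
--     base_months = days_in_year // days_in_month
--     rem = days_in_year % days_in_month
--     leap_days = days_in_month * (elapsed * rem // days_in_month)
--     return elapsed * base_months * days_in_month + leap_days + (m - 1) * days_in_month + (d - 1)
-- ===== Notes on version B (the rewrite author's own statement) =====
-- stated objective: faster
-- what changed: Replaces the per-year carry loop by O(1) closed-form arithmetic: the accumulated remainder carries after k years equal days_in_month * (k*rem // days_in_month).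
-- outside the precondition, e.g. on total_days_from_start(17, -3, 3, 29, -3): A returns 446, B returns 479
import Mathlib
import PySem

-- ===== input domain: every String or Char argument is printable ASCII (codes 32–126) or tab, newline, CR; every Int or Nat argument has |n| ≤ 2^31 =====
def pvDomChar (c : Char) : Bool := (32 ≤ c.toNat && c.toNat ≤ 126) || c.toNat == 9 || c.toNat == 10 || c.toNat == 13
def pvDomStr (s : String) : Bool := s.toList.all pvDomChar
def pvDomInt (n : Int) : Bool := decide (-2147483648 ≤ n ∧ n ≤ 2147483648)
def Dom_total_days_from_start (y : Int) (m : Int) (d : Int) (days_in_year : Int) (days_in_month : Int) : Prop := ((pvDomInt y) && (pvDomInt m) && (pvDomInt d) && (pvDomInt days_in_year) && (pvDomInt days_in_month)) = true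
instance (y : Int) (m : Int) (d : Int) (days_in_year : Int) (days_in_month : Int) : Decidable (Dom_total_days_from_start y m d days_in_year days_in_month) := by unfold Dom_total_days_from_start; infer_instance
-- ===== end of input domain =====

-- B replaces A's per-year carry loop by O(1) closed-form floor-division arithmetic (same value on Pre_).


-- ===== PORT A =====
def total_days_from_start (y : Int) (m : Int) (d : Int) (days_in_year : Int) (days_in_month : Int) : Int :=
  let rem := PySem.Int.mod days_in_year days_in_month
  let base_months := PySem.Int.floordiv days_in_year days_in_month
  -- state: (total_days, acc); 'year' is unused by the body, as in the Python
  let st := (PySem.List.pyRange 1 y 1).foldl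
    (fun (s : Int × Int) (_ : Int) =>
      let total_days := s.1 + base_months * days_in_month
      let acc := s.2 + rem
      if acc ≥ days_in_month then (total_days + days_in_month, acc - days_in_month)
      else (total_days, acc)) (0, 0)
  st.1 + (m - 1) * days_in_month + (d - 1)

-- ===== PORT B =====
def total_days_from_start_alt (y : Int) (m : Int) (d : Int) (days_in_year : Int) (days_in_month : Int) : Int :=
  let elapsed := max (y - 1) 0
  let base_months := PySem.Int.floordiv days_in_year days_in_month
  let rem := PySem.Int.mod days_in_year days_in_month
  let leap_days := days_in_month * PySem.Int.floordiv (elapsed * rem) days_in_month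
  elapsed * base_months * days_in_month + leap_days + (m - 1) * days_in_month + (d - 1)

-- ===== PRECONDITION & SPEC =====
-- Pre_ excludes days_in_month = 0, where A raises ZeroDivisionError, and the meaningless calendars
-- with days_in_month < 0 once a full year elapses (y > 1), where A's carry loop drifts unboundedly
-- (outside the natural domain, so excluded rather than mimicked).
def Pre_total_days_from_start (y : Int) (m : Int) (d : Int) (days_in_year : Int) (days_in_month : Int) : Prop :=
  0 < days_in_month ∨ (days_in_month ≠ 0 ∧ y ≤ 1)
instance (y : Int) (m : Int) (d : Int) (days_in_year : Int) (days_in_month : Int) : Decidable (Pre_total_days_from_start y m d days_in_year days_in_month) := by unfold Pre_total_days_from_start; infer_instance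

def pvWitness_total_days_from_start : Int × Int × Int × Int × Int := (3, 2, 5, 365, 30)

def Spec_total_days_from_start (y : Int) (m : Int) (d : Int) (days_in_year : Int) (days_in_month : Int) (out : Int) : Prop := out = total_days_from_start_alt y m d days_in_year days_in_month
instance (y : Int) (m : Int) (d : Int) (days_in_year : Int) (days_in_month : Int) (out : Int) : Decidable (Spec_total_days_from_start y m d days_in_year days_in_month out) := by unfold Spec_total_days_from_start; infer_instance

-- ===== CLAIM (what is proved, stated in full; the proofs are below) =====
def Claim_equal_total_days_from_start : Prop := ∀ (y : Int) (m : Int) (d : Int) (days_in_year : Int) (days_in_month : Int), Dom_total_days_from_start y m d days_in_year days_in_month → Pre_total_days_from_start y m d days_in_year days_in_month → Spec_total_days_from_start y m d days_in_year days_in_month (total_days_from_start y m d days_in_year days_in_month)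

-- ===== LEMMAS AND PROOFS =====

-- Loop invariant: starting from (t, a) with 0 ≤ a < M, folding A's body over a list of length n
-- yields total t + n*bm*M + (carried days) and acc = (a + n*rem) % M.
theorem pv_loop_closed (M rem bm : Int) (hM : 0 < M) (hr0 : 0 ≤ rem) (hr1 : rem < M) :
    ∀ (l : List Int) (t a : Int), 0 ≤ a → a < M →
      l.foldl
        (fun (s : Int × Int) (_ : Int) =>
          let total_days := s.1 + bm * M
          let acc := s.2 + rem
          if acc ≥ M then (total_days + M, acc - M)
          else (total_days, acc)) (t, a)
      = (t + (l.length : Int) * bm * M + (a + (l.length : Int) * rem - (a + (l.length : Int) * rem) % M),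
         (a + (l.length : Int) * rem) % M) := by
  intro l
  induction l with
  | nil =>
    intro t a h0 h1
    simp [Int.emod_eq_of_lt h0 h1]
  | cons x xs ih =>
    intro t a h0 h1
    simp only [List.foldl_cons, List.length_cons]
    by_cases hc : a + rem ≥ M
    · simp only [hc, if_pos]
      rw [ih (t + bm * M + M) (a + rem - M) (by omega) (by omega)]
      have e1 : (a + rem - M + (xs.length : Int) * rem) % M
          = (a + ((xs.length : Int) + 1) * rem) % M := by
        rw [show a + rem - M + (xs.length : Int) * rem
              = (a + ((xs.length : Int) + 1) * rem) + M * (-1) by ring,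
            Int.add_mul_emod_self_left]
      rw [e1]
      push_cast
      simp only [Prod.mk.injEq]
      exact ⟨by ring, trivial⟩
    · simp only [hc, if_false]
      rw [ih (t + bm * M) (a + rem) (by omega) (by omega)]
      have e1 : (a + rem + (xs.length : Int) * rem) % M
          = (a + ((xs.length : Int) + 1) * rem) % M := by
        ring_nf
      rw [e1]
      push_cast
      simp only [Prod.mk.injEq]
      exact ⟨by ring, trivial⟩

-- ===== VERDICT (by name: the statement is the Claim_ definition above) =====
theorem total_days_from_start_spec : Claim_equal_total_days_from_start := by
  intro y m d Y M _ hM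
  show total_days_from_start y m d Y M = total_days_from_start_alt y m d Y M
  simp only [total_days_from_start, total_days_from_start_alt]
  by_cases hM' : (0 : Int) < M
  case neg =>
    -- here M ≠ 0 and y ≤ 1: no year elapses, both sides are (m-1)*M + (d-1)
    have hy : y ≤ 1 := by
      rcases hM with h | ⟨-, h⟩
      · omega
      · exact h
    rw [PySem.List.pyRange_one_eq_nil (by omega)]
    have h0 : max (y - 1) 0 = 0 := by omega
    rw [h0]
    simp [PySem.Int.floordiv]
  have hr0 : 0 ≤ PySem.Int.mod Y M := by
    rw [PySem.Int.mod_eq_emod_of_pos hM']; exact Int.emod_nonneg _ (by omega)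
  have hr1 : PySem.Int.mod Y M < M := by
    rw [PySem.Int.mod_eq_emod_of_pos hM']; exact Int.emod_lt_of_pos _ hM'
  rw [pv_loop_closed M (PySem.Int.mod Y M) (PySem.Int.floordiv Y M) hM' hr0 hr1
        (PySem.List.pyRange 1 y 1) 0 0 le_rfl hM']
  rw [PySem.List.length_pyRange_one, Int.toNat_eq_max]
  set n : Int := max (y - 1) 0 with hn
  set r : Int := PySem.Int.mod Y M with hrdef
  rw [show PySem.Int.floordiv (n * r) M = n * r / M from PySem.Int.floordiv_eq_ediv_of_pos hM']
  have h := Int.emod_add_ediv (n * r) M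
  simp only [zero_add]
  linear_combination -h
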